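-- pv_equiv track=rewrite | github.com/groeneveld/mdma-guide | helperScripts/analyze_lines.py | chunk_lines_for_analysis
-- ===== SOURCE A (Python) =====
-- from typing import List, Tuple, Optional
--
-- def is_structural_command(line: str) -> bool:
--     """Check if a line is a structural LaTeX command."""
--     stripped = line.strip()
--     structural_commands = [
--         '\\chapter{', '\\section{', '\\subsection{', '\\subsubsection{',
--         '\\chapter*{', '\\section*{', '\\subsection*{', '\\subsubsection*{'
--     ]
--     return any(stripped.startswith(cmd) for cmd in structural_commands)
--
-- def chunk_lines_for_analysis(lines: List[Tuple[int, str]]) -> List[Tuple[List[int], str]]: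
--     """
--     Group lines into chunks, combining itemize/enumerate lists and quotation blocks with adjacent paragraphs
--     when they're not separated by blank lines.
--
--     Returns list of (line_numbers, combined_text) tuples.
--     """
--     chunks = []
--     i = 0
--
--     while i < len(lines):
--         line_num, line = lines[i]
--         stripped = line.strip()
--
--         # Check if this line starts a list or quotation environment
--         if '\\begin{itemize}' in stripped or '\\begin{enumerate}' in stripped or '\\begin{quotation}' in stripped:
--             # Find the start of the chunk by looking backward
--             chunk_start = i
--             # Look backward for adjacent paragraph text (no blank lines, no structural commands)
--             j = i - 1
--             while j >= 0:
--                 prev_line_num, prev_line = lines[j]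
--                 prev_stripped = prev_line.strip()
--
--                 # Stop at blank lines
--                 if not prev_stripped:
--                     break
--                 # Stop at structural commands
--                 if is_structural_command(prev_line):
--                     break
--
--                 chunk_start = j
--                 j -= 1
--
--             # Find the end of the environment
--             if '\\begin{itemize}' in stripped:
--                 env_type = 'itemize'
--             elif '\\begin{enumerate}' in stripped:
--                 env_type = 'enumerate'
--             else:
--                 env_type = 'quotation'
--
--             env_depth = 1
--             chunk_end = i
--
--             # Find matching \end{...}
--             k = i + 1
--             while k < len(lines) and env_depth > 0:
--                 end_line_num, end_line = lines[k]
--                 if f'\\begin{{{env_type}}}' in end_line: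
--                     env_depth += 1
--                 elif f'\\end{{{env_type}}}' in end_line:
--                     env_depth -= 1
--                 chunk_end = k
--                 k += 1
--
--             # Look forward for adjacent paragraph text after the environment
--             k = chunk_end + 1
--             while k < len(lines):
--                 next_line_num, next_line = lines[k]
--                 next_stripped = next_line.strip()
--
--                 # Stop at blank lines
--                 if not next_stripped:
--                     break
--                 # Stop at structural commands
--                 if is_structural_command(next_line):
--                     break
--
--                 chunk_end = k
--                 k += 1
--
--             # Create the chunk
--             chunk_lines = lines[chunk_start:chunk_end + 1]
--             line_numbers = [ln for ln, _ in chunk_lines]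
--             combined_text = '\n'.join([l for _, l in chunk_lines])
--             chunks.append((line_numbers, combined_text))
--
--             # Skip past this chunk
--             i = chunk_end + 1
--         else:
--             # Process individual line
--             chunks.append(([line_num], line))
--             i += 1
--
--     return chunks
-- ===== SOURCE B (Python) =====
-- from typing import List, Tuple
--
-- def _is_structural(line: str) -> bool:
--     s = line.strip()
--     return s.startswith(('\\chapter{', '\\section{', '\\subsection{', '\\subsubsection{',
--                          '\\chapter*{', '\\section*{', '\\subsection*{', '\\subsubsection*{'))
--
-- def _resets(line: str) -> bool:
--     """A blank or structural line ends a paragraph run."""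
--     return (not line.strip()) or _is_structural(line)
--
-- def chunk_lines_for_analysis(lines: List[Tuple[int, str]]) -> List[Tuple[List[int], str]]:
--     """Single forward pass: run_start tracks the start of the current contiguous
--     non-blank, non-structural run, so no backward scan is ever needed."""
--     chunks = []
--     n = len(lines)
--     run_start = 0
--     i = 0
--     while i < n:
--         line_num, line = lines[i]
--         stripped = line.strip()
--         if '\\begin{itemize}' in stripped:
--             env_type = 'itemize'
--         elif '\\begin{enumerate}' in stripped:
--             env_type = 'enumerate'
--         elif '\\begin{quotation}' in stripped:
--             env_type = 'quotation'
--         else: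
--             env_type = None
--
--         if env_type is None:
--             chunks.append(([line_num], line))
--             if _resets(line):
--                 run_start = i + 1
--             i += 1
--             continue
--
--         chunk_start = run_start
--         # find the matching \end{env_type}
--         env_depth = 1
--         chunk_end = i
--         k = i + 1
--         while k < n and env_depth > 0:
--             text = lines[k][1]
--             if f'\\begin{{{env_type}}}' in text:
--                 env_depth += 1
--             elif f'\\end{{{env_type}}}' in text:
--                 env_depth -= 1
--             chunk_end = k
--             k += 1
--         # absorb the adjacent paragraph after the environment
--         k = chunk_end + 1
--         while k < n and not _resets(lines[k][1]):
--             chunk_end = k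
--             k += 1
--         seg = lines[chunk_start:chunk_end + 1]
--         chunks.append(([ln for ln, _ in seg], '\n'.join(l for _, l in seg)))
--         # advance run_start through the consumed lines
--         for j in range(i, chunk_end + 1):
--             if _resets(lines[j][1]):
--                 run_start = j + 1
--         i = chunk_end + 1
--     return chunks
-- ===== Notes on version B (the rewrite author's own statement) =====
-- stated objective: alternative
-- what changed: Replaces A's backward scan from each environment opener by a single forward pass that threads run_start (the start of the current non-blank, non-structural paragraph run), so earlier lines are never re-read to find the chunk start.
import Mathlib
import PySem

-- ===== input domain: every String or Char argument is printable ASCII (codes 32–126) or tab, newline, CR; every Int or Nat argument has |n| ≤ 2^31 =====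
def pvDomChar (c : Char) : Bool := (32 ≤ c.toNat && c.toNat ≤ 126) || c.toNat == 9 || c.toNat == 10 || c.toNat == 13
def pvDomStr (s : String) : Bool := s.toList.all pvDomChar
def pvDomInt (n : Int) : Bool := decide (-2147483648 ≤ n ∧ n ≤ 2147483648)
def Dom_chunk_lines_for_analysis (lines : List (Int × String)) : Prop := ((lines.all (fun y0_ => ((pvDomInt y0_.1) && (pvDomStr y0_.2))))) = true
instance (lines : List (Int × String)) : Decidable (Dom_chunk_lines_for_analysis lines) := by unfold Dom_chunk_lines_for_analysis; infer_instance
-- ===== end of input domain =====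

-- B replaces A's backward scan (re-reading earlier lines at each environment opener) by a
-- single forward pass threading run_start, the start of the current paragraph run; same output.

-- ===== PORT A =====
-- lines[j] for an index the Python code has proven in bounds (every access below is guarded)
def pvLine (lines : List (Int × String)) (j : Nat) : Int × String := lines.getD j (0, "")

-- is_structural_command
def pvStructural (line : String) : Bool :=
  (["\\chapter{", "\\section{", "\\subsection{", "\\subsubsection{",
    "\\chapter*{", "\\section*{", "\\subsection*{", "\\subsubsection*{"]).any
    (fun cmd => PySem.Str.startswith (PySem.Str.strip line) cmd)

-- the two break conditions of A's backward/forward scans (blank line, structural command)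
def pvResets (line : String) : Bool :=
  PySem.Str.strip line == "" || pvStructural line

-- A's backward scan: called with (i, i), examines j = i-1, i-2, … while no reset line
def pvScanBack (lines : List (Int × String)) : Nat → Nat → Nat
  | 0, cs => cs
  | j + 1, cs => if pvResets (pvLine lines j).2 then cs else pvScanBack lines j j

-- the `while k < len(lines) and env_depth > 0` loop; returns chunk_end.
-- fuel = lines.length always suffices: k strictly increases and the loop stops at k = lines.length.
def pvEnvEnd (lines : List (Int × String)) (pB pE : String) : Nat → Nat → Int → Nat → Nat
  | 0, _, _, ce => ce
  | fuel + 1, k, depth, ce =>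
    if k < lines.length then
      if 0 < depth then
        pvEnvEnd lines pB pE fuel (k + 1)
          (if PySem.Str.isIn pB (pvLine lines k).2 then depth + 1
           else if PySem.Str.isIn pE (pvLine lines k).2 then depth - 1 else depth) k
      else ce
    else ce

-- the forward paragraph-absorption loop; returns chunk_end (same fuel device)
def pvAbsorb (lines : List (Int × String)) : Nat → Nat → Nat → Nat
  | 0, _, ce => ce
  | fuel + 1, k, ce =>
    if k < lines.length then
      if pvResets (pvLine lines k).2 then ce else pvAbsorb lines fuel (k + 1) k
    else ce

-- A's main `while i < len(lines)` loop; fuel = lines.length suffices since i advances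
-- by at least 1 per iteration (i ≤ chunk_end, by le_pvEnvEnd / le_pvAbsorb below)
set_option maxHeartbeats 4000000 in
def pvChunkA (lines : List (Int × String)) : Nat → Nat → List (List Int × String)
  | 0, _ => []
  | fuel + 1, i =>
    if i < lines.length then
      let stripped := PySem.Str.strip (pvLine lines i).2
      if PySem.Str.isIn "\\begin{itemize}" stripped || PySem.Str.isIn "\\begin{enumerate}" stripped
          || PySem.Str.isIn "\\begin{quotation}" stripped then
        let cs := pvScanBack lines i i
        let env := if PySem.Str.isIn "\\begin{itemize}" stripped then "itemize"
                   else if PySem.Str.isIn "\\begin{enumerate}" stripped then "enumerate"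
                   else "quotation"
        let ce := pvEnvEnd lines ("\\begin{" ++ env ++ "}") ("\\end{" ++ env ++ "}") lines.length (i + 1) 1 i
        let ce2 := pvAbsorb lines lines.length (ce + 1) ce
        let seg := PySem.List.slice lines (some (cs : Int)) (some (((ce2 + 1 : Nat) : Int)))
        (seg.map Prod.fst, PySem.Str.join "\n" (seg.map Prod.snd)) :: pvChunkA lines fuel (ce2 + 1)
      else
        ([(pvLine lines i).1], (pvLine lines i).2) :: pvChunkA lines fuel (i + 1)
    else []

def chunk_lines_for_analysis (lines : List (Int × String)) : List (List Int × String) :=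
  pvChunkA lines lines.length 0

-- ===== PORT B =====
-- B's single forward pass: rs (run_start) is the start of the current contiguous
-- non-blank, non-structural run; no backward scan.  Same fuel device as pvChunkA.
set_option maxHeartbeats 4000000 in
def pvChunkB (lines : List (Int × String)) : Nat → Nat → Int → List (List Int × String)
  | 0, _, _ => []
  | fuel + 1, i, rs =>
    if i < lines.length then
      let stripped := PySem.Str.strip (pvLine lines i).2
      let envType : Option String :=
        if PySem.Str.isIn "\\begin{itemize}" stripped then some "itemize"
        else if PySem.Str.isIn "\\begin{enumerate}" stripped then some "enumerate"
        else if PySem.Str.isIn "\\begin{quotation}" stripped then some "quotation"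
        else none
      match envType with
      | none =>
        ([(pvLine lines i).1], (pvLine lines i).2) ::
          pvChunkB lines fuel (i + 1) (if pvResets (pvLine lines i).2 then ((i + 1 : Nat) : Int) else rs)
      | some env =>
        let ce := pvEnvEnd lines ("\\begin{" ++ env ++ "}") ("\\end{" ++ env ++ "}") lines.length (i + 1) 1 i
        let ce2 := pvAbsorb lines lines.length (ce + 1) ce
        let seg := PySem.List.slice lines (some rs) (some (((ce2 + 1 : Nat) : Int)))
        (seg.map Prod.fst, PySem.Str.join "\n" (seg.map Prod.snd)) ::
          pvChunkB lines fuel (ce2 + 1)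
            ((PySem.List.pyRange (i : Int) ((ce2 + 1 : Nat) : Int) 1).foldl
              (fun r j => if pvResets (PySem.List.pyGetD lines j (0, "")).2 then j + 1 else r) rs)
    else []

def chunk_lines_for_analysis_alt (lines : List (Int × String)) : List (List Int × String) :=
  pvChunkB lines lines.length 0 0

-- ===== PRECONDITION & SPEC =====
def Spec_chunk_lines_for_analysis (lines : List (Int × String)) (out : List (List Int × String)) : Prop := out = chunk_lines_for_analysis_alt lines
instance (lines : List (Int × String)) (out : List (List Int × String)) : Decidable (Spec_chunk_lines_for_analysis lines out) := by unfold Spec_chunk_lines_for_analysis; infer_instance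

-- ===== CLAIM (what is proved, stated in full; the proofs are below) =====
def Claim_equal_chunk_lines_for_analysis : Prop := ∀ (lines : List (Int × String)), Dom_chunk_lines_for_analysis lines → Spec_chunk_lines_for_analysis lines (chunk_lines_for_analysis lines)

-- ===== LEMMAS AND PROOFS =====

theorem le_pvEnvEnd (lines : List (Int × String)) (pB pE : String) :
    ∀ fuel k (depth : Int) ce, ce ≤ k → ce ≤ pvEnvEnd lines pB pE fuel k depth ce := by
  intro fuel
  induction fuel with
  | zero => intro k d ce hce; exact le_refl ce
  | succ n ih =>
    intro k d ce hce
    rw [pvEnvEnd]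
    split
    · split
      · exact le_trans hce (ih (k + 1) _ k (Nat.le_succ k))
      · exact le_refl ce
    · exact le_refl ce

theorem le_pvAbsorb (lines : List (Int × String)) :
    ∀ fuel k ce, ce ≤ k → ce ≤ pvAbsorb lines fuel k ce := by
  intro fuel
  induction fuel with
  | zero => intro k ce hce; exact le_refl ce
  | succ n ih =>
    intro k ce hce
    rw [pvAbsorb]
    split
    · split
      · exact le_refl ce
      · exact le_trans hce (ih (k + 1) k (Nat.le_succ k))
    · exact le_refl ce

-- B's run_start update over lines[a..b) computes exactly A's backward-scan value at b
theorem fold_scanBack (lines : List (Int × String)) (a : Nat) :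
    ∀ b, a ≤ b →
      (PySem.List.pyRange (a : Int) (b : Int) 1).foldl
        (fun r j => if pvResets (PySem.List.pyGetD lines j (0, "")).2 then j + 1 else r)
        ((pvScanBack lines a a : Nat) : Int)
      = ((pvScanBack lines b b : Nat) : Int) := by
  intro b hab
  induction b, hab using Nat.le_induction with
  | base => rw [PySem.List.pyRange_one_eq_nil (le_refl _)]; rfl
  | succ b hab ih =>
    have hcast : ((b + 1 : Nat) : Int) = (b : Int) + 1 := by push_cast; ring
    rw [hcast, PySem.List.pyRange_one_succ_right (by exact_mod_cast hab), List.foldl_append, ih]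
    simp only [List.foldl_cons, List.foldl_nil, PySem.List.pyGetD_natCast]
    rw [pvScanBack]
    simp only [pvLine]
    split
    · push_cast; ring
    · rfl

set_option maxHeartbeats 4000000 in
theorem chunkA_eq_chunkB (lines : List (Int × String)) :
    ∀ fuel i, pvChunkA lines fuel i = pvChunkB lines fuel i ((pvScanBack lines i i : Nat) : Int) := by
  intro fuel
  induction fuel with
  | zero => intro i; rfl
  | succ n ih =>
    intro i
    rw [pvChunkA, pvChunkB]
    by_cases h : i < lines.length
    · rw [if_pos h, if_pos h]
      have hscan : (if pvResets (pvLine lines i).2 then ((i + 1 : Nat) : Int)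
          else ((pvScanBack lines i i : Nat) : Int)) = ((pvScanBack lines (i + 1) (i + 1) : Nat) : Int) := by
        conv_rhs => rw [pvScanBack]
        split <;> rfl
      by_cases h1 : PySem.Str.isIn "\\begin{itemize}" (PySem.Str.strip (pvLine lines i).2) = true
      · simp only [h1, Bool.true_or, if_pos]
        refine congrArg₂ List.cons rfl ?_
        set ce := pvEnvEnd lines ("\\begin{" ++ "itemize" ++ "}") ("\\end{" ++ "itemize" ++ "}") lines.length (i + 1) 1 i with hce
        set ce2 := pvAbsorb lines lines.length (ce + 1) ce with hce2
        have hice : i ≤ ce := le_pvEnvEnd lines _ _ lines.length (i + 1) 1 i (Nat.le_succ i)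
        have hce2' : ce ≤ ce2 := le_pvAbsorb lines lines.length (ce + 1) ce (Nat.le_succ ce)
        rw [fold_scanBack lines i (ce2 + 1) (by omega)]
        exact ih (ce2 + 1)
      · by_cases h2 : PySem.Str.isIn "\\begin{enumerate}" (PySem.Str.strip (pvLine lines i).2) = true
        · simp only [h1, h2, Bool.false_or, Bool.true_or, if_pos]
          refine congrArg₂ List.cons rfl ?_
          set ce := pvEnvEnd lines ("\\begin{" ++ "enumerate" ++ "}") ("\\end{" ++ "enumerate" ++ "}") lines.length (i + 1) 1 i with hce
          set ce2 := pvAbsorb lines lines.length (ce + 1) ce with hce2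
          have hice : i ≤ ce := le_pvEnvEnd lines _ _ lines.length (i + 1) 1 i (Nat.le_succ i)
          have hce2' : ce ≤ ce2 := le_pvAbsorb lines lines.length (ce + 1) ce (Nat.le_succ ce)
          rw [fold_scanBack lines i (ce2 + 1) (by omega)]
          exact ih (ce2 + 1)
        · by_cases h3 : PySem.Str.isIn "\\begin{quotation}" (PySem.Str.strip (pvLine lines i).2) = true
          · simp only [h1, h2, h3, Bool.false_or, if_pos]
            refine congrArg₂ List.cons rfl ?_
            set ce := pvEnvEnd lines ("\\begin{" ++ "quotation" ++ "}") ("\\end{" ++ "quotation" ++ "}") lines.length (i + 1) 1 i with hce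
            set ce2 := pvAbsorb lines lines.length (ce + 1) ce with hce2
            have hice : i ≤ ce := le_pvEnvEnd lines _ _ lines.length (i + 1) 1 i (Nat.le_succ i)
            have hce2' : ce ≤ ce2 := le_pvAbsorb lines lines.length (ce + 1) ce (Nat.le_succ ce)
            rw [fold_scanBack lines i (ce2 + 1) (by omega)]
            exact ih (ce2 + 1)
          · simp only [h1, h2, h3, Bool.false_or]
            refine congrArg₂ List.cons rfl ?_
            rw [hscan]
            exact ih (i + 1)
    · rw [if_neg h, if_neg h]

-- ===== VERDICT (by name: the statement is the Claim_ definition above) =====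
theorem chunk_lines_for_analysis_spec : Claim_equal_chunk_lines_for_analysis := by
  intro lines _
  unfold Spec_chunk_lines_for_analysis chunk_lines_for_analysis chunk_lines_for_analysis_alt
  have := chunkA_eq_chunkB lines lines.length 0
  simpa [pvScanBack] using this
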